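-- pv_equiv track=rewrite | github.com/Haydn389/Python | 03온라인저지/코딜리티/8.2-equil.py | solution
-- ===== SOURCE A (Python) =====
-- import collections
--
-- def solution(A):
--     answer=0
--     # write your code in Python 3.6
--     ans=collections.Counter(A).most_common(1)[0]
--     if ans[1]<=len(A)//2:
--         return 0
--     comons=[0]*len(A)
--     for i in range(len(A)):
--         if i==0 and  A[i] == ans[0]:
--             comons[0]=1
--         elif A[i] == ans[0]:
--             comons[i]=comons[i-1]+1
--         else:
--             comons[i]=comons[i-1]
--     for i in range(len(A)-1):
--         before=comons[i]
--         after=comons[len(A)-1]-before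
--         afterLen= len(A)-i-1
--         beforeLen=i+1
--         if before<= beforeLen//2 or after<=afterLen//2:
--             continue
--         else:
--             answer+=1
--
--     return answer
-- ===== SOURCE B (Python) =====
-- def solution(A):
--     n = len(A)
--     # Boyer-Moore majority vote: if a strict majority element exists, cand is it
--     cand, bal = None, 0
--     for x in A:
--         if bal == 0:
--             cand, bal = x, 1
--         elif x == cand:
--             bal += 1
--         else:
--             bal -= 1
--     pos = [i for i, x in enumerate(A) if x == cand]
--     t = len(pos)
--     if 2 * t <= n:
--         return 0
--     # between consecutive leader occurrences the prefix count of the leader is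
--     # constant, so the valid split points of each block form one interval;
--     # count each interval in closed form instead of scanning every index
--     ans = 0
--     b = 0
--     for lo, nxt in zip(pos, pos[1:] + [n - 1]):
--         b += 1
--         lo2 = max(lo, n - 2 * (t - b))
--         hi2 = min(nxt - 1, 2 * b - 2)
--         if lo2 <= hi2:
--             ans += hi2 - lo2 + 1
--     return ans
-- ===== Notes on version B (the rewrite author's own statement) =====
-- stated objective: alternative
-- what changed: B finds the leader by a Boyer-Moore majority vote instead of Counter(...).most_common, and replaces A's prefix-count array plus per-index scan of all n-1 split points by a loop over the leader's occurrence positions that counts the valid split points of each inter-occurrence block in closed form (one clamped-interval size per occurrence).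
import Mathlib
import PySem

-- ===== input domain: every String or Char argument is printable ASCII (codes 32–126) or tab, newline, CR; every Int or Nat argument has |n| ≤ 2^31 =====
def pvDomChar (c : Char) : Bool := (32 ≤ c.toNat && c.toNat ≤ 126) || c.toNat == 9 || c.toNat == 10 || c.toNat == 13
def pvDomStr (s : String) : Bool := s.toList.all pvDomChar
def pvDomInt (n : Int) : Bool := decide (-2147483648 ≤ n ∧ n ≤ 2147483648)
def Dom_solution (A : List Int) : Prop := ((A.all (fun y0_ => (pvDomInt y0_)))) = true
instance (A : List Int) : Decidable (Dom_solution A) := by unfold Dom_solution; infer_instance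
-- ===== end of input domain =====

-- B finds the leader by a Boyer-Moore vote instead of Counter.most_common and counts the
-- valid split points per leader-occurrence block in closed form instead of scanning every
-- index with a prefix-count array (alternative algorithm, same asymptotic cost).

-- ===== PORT A =====
-- body of A's comons-building loop (comons[i] updates)
def buildStep (A : List Int) (m : Int) (c : List Int) (i : Int) : List Int :=
  if i = 0 ∧ PySem.List.pyGetD A i 0 = m then c.set 0 1
  else if PySem.List.pyGetD A i 0 = m then c.set i.toNat (PySem.List.pyGetD c (i - 1) 0 + 1)
  else c.set i.toNat (PySem.List.pyGetD c (i - 1) 0)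

-- body of A's answer-counting loop
def countStep (comons : List Int) (n : Int) (answer : Int) (i : Int) : Int :=
  let before := PySem.List.pyGetD comons i 0
  let after := PySem.List.pyGetD comons (n - 1) 0 - before
  let afterLen := n - i - 1
  let beforeLen := i + 1
  if before ≤ PySem.Int.floordiv beforeLen 2 ∨ after ≤ PySem.Int.floordiv afterLen 2 then answer
  else answer + 1

def solution (A : List Int) : Int :=
  let n : Int := A.length
  -- most_common(1)[0]: head of the count-descending stable sort of the Counter's items;
  -- on A = [] Python raises IndexError (excluded by Pre_solution), the port returns 0 there
  match PySem.List.sorted (PySem.Dict.counter A).items (fun p => p.2) true with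
  | [] => 0
  | ans :: _ =>
    if ans.2 ≤ PySem.Int.floordiv n 2 then 0
    else
      let comons := (PySem.List.pyRange 0 n).foldl (buildStep A ans.1) (List.replicate A.length 0)
      (PySem.List.pyRange 0 (n - 1)).foldl (countStep comons n) 0

-- ===== PORT B =====
-- body of B's Boyer-Moore voting loop; state = (cand, bal)
def voteStep (st : Option Int × Int) (x : Int) : Option Int × Int :=
  if st.2 = 0 then (some x, 1)
  else if some x = st.1 then (st.1, st.2 + 1)
  else (st.1, st.2 - 1)

-- body of B's per-block counting loop; state = (ans, b), p = (lo, nxt)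
def blockStep (n t : Int) (st : Int × Int) (p : Int × Int) : Int × Int :=
  let b := st.2 + 1
  let lo2 := max p.1 (n - 2 * (t - b))
  let hi2 := min (p.2 - 1) (2 * b - 2)
  (if lo2 ≤ hi2 then st.1 + (hi2 - lo2 + 1) else st.1, b)

def solution_alt (A : List Int) : Int :=
  let n : Int := A.length
  let cb := A.foldl voteStep (none, 0)
  let pos := ((PySem.List.enumerate A).filter (fun p => decide (some p.2 = cb.1))).map (fun p => p.1)
  let t : Int := pos.length
  if 2 * t ≤ n then 0
  else ((pos.zip (PySem.List.slice pos (some 1) none ++ [n - 1])).foldl (blockStep n t) (0, 0)).1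

-- ===== PRECONDITION & SPEC =====
-- Pre_ excludes only the empty list, on which Python A raises IndexError.
def Pre_solution (A : List Int) : Prop := A ≠ []
instance (A : List Int) : Decidable (Pre_solution A) := by unfold Pre_solution; infer_instance
def pvWitness_solution : List Int := [1, 1, 2]

def Spec_solution (A : List Int) (out : Int) : Prop := out = solution_alt A
instance (A : List Int) (out : Int) : Decidable (Spec_solution A out) := by unfold Spec_solution; infer_instance

-- ===== CLAIM (what is proved, stated in full; the proofs are below) =====
def Claim_equal_solution : Prop := ∀ (A : List Int), Dom_solution A → Pre_solution A → Spec_solution A (solution A)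

-- ===== LEMMAS AND PROOFS =====

-- prefix count of m among the first k elements of A, as an Int
def pcnt (m : Int) (A : List Int) (k : Nat) : Int := ((A.take k).count m : Int)

-- indices of m in A (Python's [i for i, x in enumerate(A) if x == m]), via the range view
def posOf (m : Int) (A : List Int) : List Int :=
  (PySem.List.pyRange 0 (A.length : Int) 1).filter (fun j => decide (PySem.List.pyGetD A j 0 = m))

-- the split-point condition, as a predicate of the index alone
def condB (m : Int) (A : List Int) (t i : Int) : Bool :=
  decide (2 * pcnt m A (i + 1).toNat > i + 1 ∧
    2 * (t - pcnt m A (i + 1).toNat) > (A.length : Int) - i - 1)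

lemma pcnt_zero (m : Int) (A : List Int) : pcnt m A 0 = 0 := by simp [pcnt]

lemma pcnt_succ (m : Int) (A : List Int) (j : Nat) (hj : j < A.length) :
    pcnt m A (j + 1) = pcnt m A j + (if A[j] = m then 1 else 0) := by
  simp only [pcnt, List.take_add_one, List.getElem?_eq_getElem hj, Option.toList_some,
    List.count_append, List.count_singleton]
  by_cases h : A[j] = m
  · simp [h]
  · simp [h]

lemma set_map_range (N j : Nat) (f : Nat → Int) (v : Int) :
    ((List.range N).map f).set j v = (List.range N).map (fun k => if k = j then v else f k) := by
  apply List.ext_getElem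
  · simp
  · intro i h1 h2
    simp only [List.getElem_set, List.getElem_map, List.getElem_range]
    split_ifs with h1 h2 h2
    · rfl
    · exact absurd h1.symm h2
    · exact absurd h2.symm h1
    · rfl

lemma pyGetD_map_range_int (N : Nat) (f : Nat → Int) (j : Nat) (hj : j < N) (d : Int) :
    PySem.List.pyGetD ((List.range N).map f) (j : Int) d = f j := by
  rw [PySem.List.pyGetD_of_nonneg _ _ (by positivity)]
  simp [hj]

lemma pyGetD_neg_one_map_range (N : Nat) (hN : 0 < N) (f : Nat → Int) (d : Int) :
    PySem.List.pyGetD ((List.range N).map f) (-1) d = f (N - 1) := by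
  have h1 : ¬ (0 : Int) ≤ -1 := by omega
  have h2 : -(N : Int) ≤ -1 := by omega
  simp only [PySem.List.pyGetD, PySem.List.pyGet?, PySem.List.pyIdx?, List.length_map,
    List.length_range, if_neg h1, if_pos h2]
  show ((List.map f (List.range N))[N - (-(-1:Int)).toNat]?).getD d = f (N - 1)
  have : N - (-(-1:Int)).toNat = N - 1 := by omega
  rw [this, List.getElem?_map, List.getElem?_range (by omega : N - 1 < N)]
  rfl

lemma build_inv (A : List Int) (m : Int) (j : Nat) (hj : j ≤ A.length) :
    (PySem.List.pyRange 0 (j : Int)).foldl (buildStep A m) (List.replicate A.length 0)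
      = (List.range A.length).map (fun k => if k < j then pcnt m A (k + 1) else 0) := by
  induction j with
  | zero =>
    rw [PySem.List.pyRange_one_eq_nil (by omega)]
    simp
  | succ j ih =>
    have hj' : j < A.length := by omega
    rw [show ((j + 1 : Nat) : Int) = (j : Int) + 1 by push_cast; ring,
      PySem.List.pyRange_one_succ_right (by positivity), List.foldl_append, ih (by omega)]
    simp only [List.foldl_cons, List.foldl_nil]
    have hA : PySem.List.pyGetD A (j : Int) 0 = A[j] :=
      PySem.List.pyGetD_eq_getElem A 0 (by positivity) (by exact_mod_cast hj')
    unfold buildStep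
    rw [hA]
    rcases Nat.eq_zero_or_pos j with rfl | hjpos
    · simp only [Nat.cast_zero]
      have hf1 : ∀ k, (if k < 0 + 1 then pcnt m A (k + 1) else 0)
          = (if k = 0 then pcnt m A 1 else (if k < (0:Nat) then pcnt m A (k+1) else 0)) := by
        intro k
        rcases Nat.eq_zero_or_pos k with rfl | hk
        · simp
        · have h1 : ¬ k < 0 + 1 := by omega
          have h2 : k ≠ 0 := by omega
          simp [h1, h2]
      by_cases hm : A[0] = m
      · rw [if_pos ⟨trivial, hm⟩, set_map_range]
        apply List.map_congr_left
        intro k hk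
        rw [hf1 k]
        congr 1
        rw [show (1:Nat) = 0 + 1 from rfl, pcnt_succ m A 0 hj', pcnt_zero]
        simp [hm]
      · rw [if_neg (fun h => hm h.2), if_neg hm, show (0:Int) - 1 = -1 by ring,
          pyGetD_neg_one_map_range _ (by omega), if_neg (show ¬ (A.length - 1 < 0) by omega),
          Int.toNat_zero, set_map_range]
        apply List.map_congr_left
        intro k hk
        rw [hf1 k]
        congr 1
        rw [show (1:Nat) = 0 + 1 from rfl, pcnt_succ m A 0 hj', pcnt_zero]
        simp [hm]
    · have hj0 : ¬ ((j : Int) = 0 ∧ A[j] = m) := fun h => by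
        have : j = 0 := by exact_mod_cast h.1
        omega
      rw [if_neg hj0]
      have hread : PySem.List.pyGetD ((List.range A.length).map
          (fun k => if k < j then pcnt m A (k + 1) else 0)) ((j : Int) - 1) 0 = pcnt m A j := by
        rw [show (j : Int) - 1 = ((j - 1 : Nat) : Int) by omega,
          pyGetD_map_range_int _ _ _ (by omega)]
        rw [if_pos (by omega : j - 1 < j)]
        congr 1
        omega
      have hgen : ∀ k, k < A.length → ((if k = j then pcnt m A (j + 1)
            else (if k < j then pcnt m A (k + 1) else 0)) : Int)
          = (if k < j + 1 then pcnt m A (k + 1) else 0) := by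
        intro k _
        by_cases hkj : k = j
        · subst hkj; simp
        · have : (k < j) ↔ (k < j + 1) := by omega
          simp [hkj, this]
      by_cases hm : A[j] = m
      · rw [if_pos hm, hread]
        simp only [Int.toNat_natCast]
        rw [set_map_range]
        apply List.map_congr_left
        intro k hk
        rw [← hgen k (by simpa using hk)]
        congr 1
        rw [pcnt_succ m A j hj']
        simp [hm]
      · rw [if_neg hm, hread]
        simp only [Int.toNat_natCast]
        rw [set_map_range]
        apply List.map_congr_left
        intro k hk
        rw [← hgen k (by simpa using hk)]
        congr 1
        rw [pcnt_succ m A j hj']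
        simp [hm]

-- membership in posOf
lemma mem_posOf (m : Int) (A : List Int) (p : Int) :
    p ∈ posOf m A ↔ 0 ≤ p ∧ p < (A.length : Int) ∧ PySem.List.pyGetD A p 0 = m := by
  simp [posOf, List.mem_filter, PySem.List.mem_pyRange_one, and_assoc]

lemma pairwise_posOf (m : Int) (A : List Int) : (posOf m A).Pairwise (· < ·) :=
  (PySem.List.pairwise_lt_pyRange_one 0 (A.length : Int)).filter _

-- the filtered-range count of m below k is the prefix count
lemma range_count (m : Int) (A : List Int) :
    ∀ (k : Nat), k ≤ A.length →
      ((((PySem.List.pyRange 0 (k : Int) 1).filter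
          (fun j => decide (PySem.List.pyGetD A j 0 = m))).length : Int)) = pcnt m A k := by
  intro k
  induction k with
  | zero =>
    intro _
    rw [show ((0:Nat):Int) = 0 by norm_num, PySem.List.pyRange_one_eq_nil (by omega)]
    simp [pcnt]
  | succ k ih =>
    intro hk
    rw [show ((k+1:Nat):Int) = (k:Int)+1 by push_cast; ring,
      PySem.List.pyRange_one_succ_right (by positivity), List.filter_append,
      List.length_append, pcnt_succ m A k (by omega)]
    have hA : PySem.List.pyGetD A (k : Int) 0 = A[k] :=
      PySem.List.pyGetD_eq_getElem A 0 (by positivity) (by exact_mod_cast (show k < A.length by omega))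
    rw [← ih (by omega)]
    by_cases hm : A[k] = m
    · simp [hA, hm]
      exact hm
    · simp [hA, hm]
      exact hm

-- the elements of posOf below k count the prefix occurrences
lemma posOf_count (m : Int) (A : List Int) (k : Nat) (hk : k ≤ A.length) :
    ((((posOf m A).filter (fun p => decide (p < (k : Int)))).length : Int)) = pcnt m A k := by
  have hsplit : PySem.List.pyRange 0 (A.length : Int) 1 =
      PySem.List.pyRange 0 (k : Int) 1 ++ PySem.List.pyRange (k : Int) (A.length : Int) 1 :=
    PySem.List.pyRange_one_append _ _ _ (by positivity) (by exact_mod_cast hk)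
  unfold posOf
  rw [List.filter_filter, hsplit, List.filter_append]
  have h2 : (PySem.List.pyRange (k : Int) (A.length : Int) 1).filter
      (fun j => decide (j < (k : Int)) && decide (PySem.List.pyGetD A j 0 = m)) = [] := by
    apply List.filter_eq_nil_iff.mpr
    intro a ha
    have hmem := PySem.List.mem_pyRange_one.mp ha
    simp only [Bool.and_eq_true, decide_eq_true_eq, not_and]
    omega
  have h1 : (PySem.List.pyRange 0 (k : Int) 1).filter
      (fun j => decide (j < (k : Int)) && decide (PySem.List.pyGetD A j 0 = m))
      = (PySem.List.pyRange 0 (k : Int) 1).filter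
          (fun j => decide (PySem.List.pyGetD A j 0 = m)) := by
    apply List.filter_congr
    intro x hx
    have hmem := PySem.List.mem_pyRange_one.mp hx
    have hx' : x < (k : Int) := hmem.2
    simp [hx']
  rw [h1, h2, List.append_nil]
  exact range_count m A k hk

lemma length_posOf (m : Int) (A : List Int) :
    ((posOf m A).length : Int) = (A.count m : Int) := by
  have hfull : (posOf m A).filter (fun p => decide (p < (A.length : Int))) = posOf m A := by
    apply List.filter_eq_self.mpr
    intro a ha
    have := (mem_posOf m A a).mp ha
    simp only [decide_eq_true_eq]
    omega
  have := posOf_count m A A.length (le_refl _)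
  rw [hfull] at this
  rw [this]
  simp [pcnt]

-- the port's comprehension over enumerate is posOf
lemma pos_eq_posOf (m : Int) (A : List Int) :
    ((PySem.List.enumerate A).filter (fun p => decide (some p.2 = some m))).map (fun p => p.1)
      = posOf m A := by
  rw [PySem.List.enumerate_eq_map_pyRange A 0, List.filter_map, List.map_map]
  simp only [Function.comp_def, posOf, PySem.List.len_eq]
  simp

-- Boyer-Moore invariant: the balance is nonnegative and bounds every count
lemma vote_inv (l : List Int) : ∀ (st : Option Int × Int), 0 ≤ st.2 →
    0 ≤ (l.foldl voteStep st).2 ∧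
    ∀ x : Int, 2 * (l.count x : Int) + (if some x = st.1 then st.2 else -st.2)
      ≤ (l.length : Int) +
        (if some x = (l.foldl voteStep st).1 then (l.foldl voteStep st).2
         else -(l.foldl voteStep st).2) := by
  induction l with
  | nil =>
    intro st hst
    exact ⟨hst, fun x => by simp⟩
  | cons a tl ih =>
    intro st hst
    simp only [List.foldl_cons]
    have hst' : 0 ≤ (voteStep st a).2 := by
      unfold voteStep
      split_ifs <;> simp <;> omega
    obtain ⟨h1, h2⟩ := ih (voteStep st a) hst'
    refine ⟨h1, fun x => ?_⟩
    have h3 := h2 x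
    have hkey : 2 * ((if a = x then 1 else 0 : Int)) + (if some x = st.1 then st.2 else -st.2)
        ≤ 1 + (if some x = (voteStep st a).1 then (voteStep st a).2 else -(voteStep st a).2) := by
      unfold voteStep
      by_cases hz : st.2 = 0
      · by_cases hx : a = x
        · subst hx
          simp [hz]
        · simp [hz, hx, show ¬ some x = some a from fun h => hx (Option.some_inj.mp h).symm]
      · by_cases hax : some a = st.1
        · rw [if_neg hz, if_pos hax]
          by_cases hxs : some x = st.1
          · have hx : a = x := Option.some_inj.mp (hax.trans hxs.symm)
            simp [hxs, hx]
            try omega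
          · have hx : ¬ a = x := fun h => hxs (h ▸ hax)
            simp [hxs, hx]
            try omega
        · rw [if_neg hz, if_neg hax]
          by_cases hxs : some x = st.1
          · have hx : ¬ a = x := fun h => hax (h ▸ hxs)
            simp [hxs, hx]
            try omega
          · by_cases hx : a = x <;> simp [hx, hxs] <;> try omega
    by_cases hx : a = x
    · subst hx
      rw [if_pos rfl] at hkey
      simp only [List.count_cons_self, List.length_cons]
      push_cast
      generalize (if some a = st.1 then st.2 else -st.2) = w0 at hkey ⊢
      generalize (if some a = (voteStep st a).1 then (voteStep st a).2
        else -(voteStep st a).2) = w1 at hkey h3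
      generalize (if some a = (tl.foldl voteStep (voteStep st a)).1
        then (tl.foldl voteStep (voteStep st a)).2
        else -(tl.foldl voteStep (voteStep st a)).2) = w2 at h3 ⊢
      omega
    · rw [if_neg hx] at hkey
      have hbx : (a == x) = false := beq_eq_false_iff_ne.mpr hx
      rw [List.count_cons]
      simp only [hbx, Bool.false_eq_true, if_false, Nat.add_zero, List.length_cons]
      push_cast
      generalize (if some x = st.1 then st.2 else -st.2) = w0 at hkey ⊢
      generalize (if some x = (voteStep st a).1 then (voteStep st a).2
        else -(voteStep st a).2) = w1 at hkey h3
      generalize (if some x = (tl.foldl voteStep (voteStep st a)).1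
        then (tl.foldl voteStep (voteStep st a)).2
        else -(tl.foldl voteStep (voteStep st a)).2) = w2 at h3 ⊢
      omega

lemma vote_isSome (l : List Int) : ∀ (st : Option Int × Int), st.1.isSome →
    ((l.foldl voteStep st).1).isSome := by
  induction l with
  | nil => intro st h; simpa using h
  | cons a tl ih =>
    intro st h
    simp only [List.foldl_cons]
    apply ih
    unfold voteStep
    split_ifs <;> simp_all

-- closed form for counting the members of an interval inside a range
lemma countP_between (a c lo hi : Int) :
    (((PySem.List.pyRange a c 1).countP (fun i => decide (lo ≤ i ∧ i ≤ hi))) : Int)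
      = if max a lo ≤ min (c - 1) hi then min (c - 1) hi - max a lo + 1 else 0 := by
  have aux : ∀ (k : Nat) (a : Int),
      (((PySem.List.pyRange a (a + (k : Int)) 1).countP
          (fun i => decide (lo ≤ i ∧ i ≤ hi))) : Int)
        = if max a lo ≤ min (a + (k : Int) - 1) hi
          then min (a + (k : Int) - 1) hi - max a lo + 1 else 0 := by
    intro k
    induction k with
    | zero =>
      intro a
      rw [show a + ((0:Nat):Int) = a by norm_num, PySem.List.pyRange_one_eq_nil (by omega)]
      simp only [List.countP_nil, Nat.cast_zero]
      split_ifs with h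
      · omega
      · rfl
    | succ k ih =>
      intro a
      rw [show a + ((k+1:Nat):Int) = (a + (k:Int)) + 1 by push_cast; ring,
        PySem.List.pyRange_one_succ_right (by omega), List.countP_append]
      push_cast
      rw [ih a]
      simp only [List.countP_cons, List.countP_nil, decide_eq_true_eq]
      split_ifs <;> push_cast <;> omega
  by_cases hac : c ≤ a
  · rw [PySem.List.pyRange_one_eq_nil hac]
    simp only [List.countP_nil, Nat.cast_zero]
    split_ifs with h
    · omega
    · rfl
  · obtain ⟨k, hk⟩ : ∃ k : Nat, c = a + (k : Int) := ⟨(c - a).toNat, by omega⟩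
    subst hk
    exact aux k a

-- B's block loop counts exactly the condB-indices from the first remaining position on
lemma block_sum (A : List Int) (m : Int) :
    ∀ (qs front : List Int) (acc : Int),
      posOf m A = front ++ qs →
      ((qs.zip (qs.drop 1 ++ [(A.length : Int) - 1])).foldl
          (blockStep (A.length : Int) ((posOf m A).length : Int))
          (acc, (front.length : Int))).1
        = acc + (((PySem.List.pyRange (qs.headD ((A.length : Int) - 1)) ((A.length : Int) - 1) 1).countP
            (condB m A ((posOf m A).length : Int))) : Int) := by
  intro qs
  induction qs with
  | nil =>
    intro front acc h
    simp [PySem.List.pyRange_one_eq_nil (le_refl ((A.length : Int) - 1))]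
  | cons q rest ih =>
    intro front acc hsplit
    have hpw : (posOf m A).Pairwise (· < ·) := pairwise_posOf m A
    have hq_mem : q ∈ posOf m A := by rw [hsplit]; simp
    have hqb := (mem_posOf m A q).mp hq_mem
    have hqs_pw : (q :: rest).Pairwise (· < ·) :=
      (List.pairwise_append.mp (hsplit ▸ hpw)).2.1
    have hfront_lt : ∀ a ∈ front, a < q := fun a ha =>
      (List.pairwise_append.mp (hsplit ▸ hpw)).2.2 a ha q (by simp)
    have hrest_gt : ∀ b ∈ rest, q < b := (List.pairwise_cons.mp hqs_pw).1
    have hrest_nxt : ∀ b ∈ rest, rest.headD ((A.length : Int) - 1) ≤ b := by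
      cases rest with
      | nil => intro b hb; cases hb
      | cons r rs =>
        intro b hb
        rcases List.mem_cons.mp hb with rfl | hb'
        · simp
        · simp only [List.headD_cons]
          exact ((List.pairwise_cons.mp (List.pairwise_cons.mp hqs_pw).2).1 b hb').le
    have hrest_lt : ∀ b ∈ rest, b < (A.length : Int) := by
      intro b hb
      have : b ∈ posOf m A := by rw [hsplit]; simp [hb]
      exact ((mem_posOf m A b).mp this).2.1
    have hqle : q ≤ rest.headD ((A.length : Int) - 1) := by
      cases rest with
      | nil => simp; omega
      | cons r rs => simpa using hrest_gt r (by simp) |>.le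
    have hnle : rest.headD ((A.length : Int) - 1) ≤ (A.length : Int) - 1 := by
      cases rest with
      | nil => simp
      | cons r rs =>
        simp only [List.headD_cons]
        have := hrest_lt r (by simp)
        omega
    have hcnt_blk : ∀ i, q ≤ i → i < rest.headD ((A.length : Int) - 1) →
        pcnt m A (i + 1).toNat = (front.length : Int) + 1 := by
      intro i hqi hinxt
      have h0i : 0 ≤ i := le_trans hqb.1 hqi
      have hk : (i + 1).toNat ≤ A.length := by omega
      rw [← posOf_count m A (i + 1).toNat hk]
      have hfil : (posOf m A).filter
          (fun p => decide (p < (((i + 1).toNat : Nat) : Int))) = front ++ [q] := by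
        have hcast : ((((i + 1).toNat : Nat)) : Int) = i + 1 := by omega
        rw [hsplit, List.filter_append, List.filter_cons]
        have h1 : front.filter (fun p => decide (p < (((i + 1).toNat : Nat) : Int))) = front := by
          apply List.filter_eq_self.mpr
          intro a ha
          have := hfront_lt a ha
          simp only [decide_eq_true_eq]
          omega
        have h2 : rest.filter (fun p => decide (p < (((i + 1).toNat : Nat) : Int))) = [] := by
          apply List.filter_eq_nil_iff.mpr
          intro b hb
          have := hrest_nxt b hb
          simp only [decide_eq_true_eq]
          omega
        have h3 : (decide (q < (((i + 1).toNat : Nat) : Int))) = true := by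
          simp only [decide_eq_true_eq]
          omega
        rw [h1, h2, h3]
        simp
      rw [hfil]
      push_cast [List.length_append, List.length_singleton]
      ring
    have hcond_blk : ∀ i ∈ PySem.List.pyRange q (rest.headD ((A.length : Int) - 1)) 1,
        condB m A ((posOf m A).length : Int) i
          = decide ((A.length : Int) - 2 * (((posOf m A).length : Int) - ((front.length : Int) + 1)) ≤ i
              ∧ i ≤ 2 * ((front.length : Int) + 1) - 2) := by
      intro i hi
      have hmem := PySem.List.mem_pyRange_one.mp hi
      unfold condB
      rw [hcnt_blk i hmem.1 hmem.2]
      exact decide_eq_decide.mpr (by constructor <;> intro h <;> omega)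
    have hzip : (q :: rest).zip ((q :: rest).drop 1 ++ [(A.length : Int) - 1])
        = (q, rest.headD ((A.length : Int) - 1))
            :: (rest.zip (rest.drop 1 ++ [(A.length : Int) - 1])) := by
      cases rest <;> simp
    rw [hzip]
    simp only [List.foldl_cons]
    have hcountblk : ((PySem.List.pyRange q (rest.headD ((A.length : Int) - 1)) 1).countP
          (condB m A ((posOf m A).length : Int)) : Int)
        = if max q ((A.length : Int) - 2 * (((posOf m A).length : Int) - ((front.length : Int) + 1)))
              ≤ min (rest.headD ((A.length : Int) - 1) - 1) (2 * ((front.length : Int) + 1) - 2)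
          then min (rest.headD ((A.length : Int) - 1) - 1) (2 * ((front.length : Int) + 1) - 2)
            - max q ((A.length : Int) - 2 * (((posOf m A).length : Int) - ((front.length : Int) + 1))) + 1
          else 0 := by
      rw [List.countP_congr (fun x hx => by rw [hcond_blk x hx]),
        countP_between q (rest.headD ((A.length : Int) - 1)) _ _]
    have hstep : blockStep (A.length : Int) ((posOf m A).length : Int)
          (acc, (front.length : Int)) (q, rest.headD ((A.length : Int) - 1))
        = (acc + ((PySem.List.pyRange q (rest.headD ((A.length : Int) - 1)) 1).countP
            (condB m A ((posOf m A).length : Int)) : Int), (front.length : Int) + 1) := by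
      simp only [blockStep, hcountblk]
      split_ifs with h
      · rfl
      · simp
    rw [hstep]
    have hih := ih (front ++ [q]) (acc + ((PySem.List.pyRange q (rest.headD ((A.length : Int) - 1)) 1).countP
        (condB m A ((posOf m A).length : Int)) : Int)) (by rw [hsplit]; simp)
    rw [show ((front ++ [q]).length : Int) = (front.length : Int) + 1 by simp] at hih
    rw [hih]
    have hsplitrange : PySem.List.pyRange q ((A.length : Int) - 1) 1
        = PySem.List.pyRange q (rest.headD ((A.length : Int) - 1)) 1
          ++ PySem.List.pyRange (rest.headD ((A.length : Int) - 1)) ((A.length : Int) - 1) 1 :=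
      PySem.List.pyRange_one_append _ _ _ hqle hnle
    simp only [List.headD_cons]
    rw [hsplitrange, List.countP_append]
    push_cast
    ring

-- A's counting loop counts the condB-indices of the whole range
lemma a_count (A : List Int) (m : Int) (hA : 1 ≤ A.length) :
    (PySem.List.pyRange 0 ((A.length : Int) - 1)).foldl
        (countStep ((List.range A.length).map (fun k => pcnt m A (k + 1))) (A.length : Int)) 0
      = ((PySem.List.pyRange 0 ((A.length : Int) - 1) 1).countP
          (condB m A ((posOf m A).length : Int)) : Int) := by
  have hreadn : PySem.List.pyGetD ((List.range A.length).map (fun k => pcnt m A (k + 1)))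
      ((A.length : Int) - 1) 0 = pcnt m A A.length := by
    rw [show ((A.length : Int) - 1) = ((A.length - 1 : Nat) : Int) by omega,
      pyGetD_map_range_int _ _ _ (by omega)]
    congr 1
    omega
  have ht : ((posOf m A).length : Int) = pcnt m A A.length := by
    rw [length_posOf]
    simp [pcnt]
  have hcongr : ∀ (ans : Int) (i : Int), i ∈ PySem.List.pyRange 0 ((A.length : Int) - 1) 1 →
      countStep ((List.range A.length).map (fun k => pcnt m A (k + 1))) (A.length : Int) ans i
        = (if condB m A ((posOf m A).length : Int) i then ans + 1 else ans) := by
    intro ans i hi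
    have hmem := PySem.List.mem_pyRange_one.mp hi
    have hreadi : PySem.List.pyGetD ((List.range A.length).map (fun k => pcnt m A (k + 1))) i 0
        = pcnt m A (i.toNat + 1) := by
      have h := pyGetD_map_range_int A.length (fun k => pcnt m A (k + 1)) i.toNat (by omega) 0
      rwa [show ((i.toNat : Nat) : Int) = i by omega] at h
    simp only [countStep, condB]
    rw [hreadi, hreadn, ht,
      PySem.Int.floordiv_eq_ediv_of_pos (a := i + 1) (by omega),
      PySem.Int.floordiv_eq_ediv_of_pos (a := (A.length : Int) - i - 1) (by omega)]
    simp only [show (i + 1).toNat = i.toNat + 1 from by omega, decide_eq_true_eq]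
    split_ifs with hA hB hB
    · exfalso
      rcases hA with h | h <;> omega
    · rfl
    · rfl
    · exfalso
      rw [not_or] at hA
      omega
  have hfold : (PySem.List.pyRange 0 ((A.length : Int) - 1)).foldl
      (countStep ((List.range A.length).map (fun k => pcnt m A (k + 1))) (A.length : Int)) 0
      = (PySem.List.pyRange 0 ((A.length : Int) - 1)).foldl
          (fun ans i => if condB m A ((posOf m A).length : Int) i then ans + 1 else ans) 0 :=
    PySem.List.foldl_congr_mem _ _ _ _ hcongr
  rw [hfold, PySem.List.foldl_if_add_one]
  simp

-- no index before the first occurrence satisfies condB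
lemma gap_count (A : List Int) (m : Int) (hpos : posOf m A ≠ []) :
    ((PySem.List.pyRange 0 ((posOf m A).headD ((A.length : Int) - 1)) 1).countP
        (condB m A ((posOf m A).length : Int))) = 0 := by
  obtain ⟨q, qs, hq⟩ : ∃ q qs, posOf m A = q :: qs := by
    cases h : posOf m A with
    | nil => exact absurd h hpos
    | cons q qs => exact ⟨q, qs, rfl⟩
  have hqb := (mem_posOf m A q).mp (by rw [hq]; simp)
  have hrest : ∀ b ∈ qs, q < b := (List.pairwise_cons.mp (hq ▸ pairwise_posOf m A)).1
  rw [List.countP_eq_zero]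
  intro i hi
  have hmem := PySem.List.mem_pyRange_one.mp hi
  rw [hq] at hmem
  simp only [List.headD_cons] at hmem
  have hcnt : pcnt m A (i + 1).toNat = 0 := by
    rw [← posOf_count m A (i + 1).toNat (by omega)]
    have hnil : (posOf m A).filter (fun p => decide (p < (((i + 1).toNat : Nat) : Int))) = [] := by
      apply List.filter_eq_nil_iff.mpr
      intro b hb
      rw [hq] at hb
      have hqi : q ≤ b := by
        rcases List.mem_cons.mp hb with rfl | hb'
        · exact le_refl _
        · exact (hrest b hb').le
      simp only [decide_eq_true_eq]
      omega
    rw [hnil]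
    simp
  unfold condB
  simp only [decide_eq_true_eq, not_and, not_lt]
  intro h
  omega

-- ===== VERDICT (by name: the statement is the Claim_ definition above) =====
theorem solution_spec : Claim_equal_solution := by
  intro A _ hpre
  unfold Spec_solution solution solution_alt
  have hlen : 1 ≤ A.length := by
    cases A with
    | nil => exact absurd rfl hpre
    | cons a t => simp
  have hne : (PySem.Dict.counter A).items ≠ [] := by
    rw [PySem.Dict.items_counter]
    cases A with
    | nil => exact absurd rfl hpre
    | cons a t =>
      have ha : a ∈ PySem.Set.ofList (a :: t) := (PySem.Set.mem_ofList _ _).mpr (by simp)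
      simp only [ne_eq, List.map_eq_nil_iff]
      exact fun h => by rw [h] at ha; simp at ha
  cases hs : PySem.List.sorted (PySem.Dict.counter A).items (fun p => p.2) true with
  | nil => exact absurd ((PySem.List.sorted_eq_nil_iff _ _ _).mp hs) hne
  | cons hd tl =>
    dsimp only
    have hhd : hd ∈ (PySem.Dict.counter A).items := by
      have hmem : hd ∈ PySem.List.sorted (PySem.Dict.counter A).items (fun p => p.2) true := by
        rw [hs]; exact List.mem_cons_self
      rwa [PySem.List.mem_sorted] at hmem
    have hub := PySem.List.key_head_sorted_rev_ge (PySem.Dict.counter A).items (fun p => p.2) hs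
    rw [PySem.Dict.items_counter] at hhd
    obtain ⟨kh, hkh, heq⟩ := List.mem_map.mp hhd
    have hkhA : kh ∈ A := (PySem.Set.mem_ofList _ _).mp hkh
    have hd1 : hd.1 = kh := by rw [← heq]
    have hd2 : hd.2 = ((A.count kh : Nat) : Int) := by rw [← heq]
    have hpos : 1 ≤ hd.2 := by
      have := List.count_pos_iff.mpr hkhA
      rw [hd2]; exact_mod_cast this
    have hubA : ∀ x : Int, ((A.count x : Nat) : Int) ≤ hd.2 := by
      intro x
      by_cases hxA : x ∈ A
      · have hxitem : (x, ((A.count x : Nat) : Int)) ∈ (PySem.Dict.counter A).items := by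
          rw [PySem.Dict.items_counter]
          exact List.mem_map.mpr ⟨x, (PySem.Set.mem_ofList _ _).mpr hxA, rfl⟩
        simpa using hub _ hxitem
      · rw [List.count_eq_zero_of_not_mem hxA]
        exact le_trans (by norm_num) hpos
    obtain ⟨c, hc⟩ : ∃ c, (A.foldl voteStep (none, 0)).1 = some c := by
      cases A with
      | nil => exact absurd rfl hpre
      | cons a t =>
        have h1 : voteStep ((none : Option Int), (0 : Int)) a = (some a, 1) := by
          unfold voteStep; simp
        have h2 := vote_isSome t (voteStep (none, 0) a) (by rw [h1]; rfl)
        simp only [List.foldl_cons]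
        exact Option.isSome_iff_exists.mp h2
    simp only [hc, pos_eq_posOf]
    have hfd : PySem.Int.floordiv (A.length : Int) 2 = (A.length : Int) / 2 :=
      PySem.Int.floordiv_eq_ediv_of_pos (by omega)
    by_cases hg : 2 * hd.2 ≤ (A.length : Int)
    · rw [if_pos (by rw [hfd]; omega)]
      have hBg : 2 * ((posOf c A).length : Int) ≤ (A.length : Int) := by
        rw [length_posOf]
        have := hubA c
        omega
      rw [if_pos hBg]
    · have hbound := (vote_inv A (none, 0) (le_refl 0)).2 hd.1
      have hbal := (vote_inv A (none, 0) (le_refl 0)).1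
      have hceq : c = hd.1 := by
        by_contra hne2
        have hfalse : ¬ (some hd.1 = some c) := by simpa [eq_comm] using hne2
        rw [hc] at hbound
        simp only [if_neg hfalse] at hbound
        have hinit : (if some hd.1 = (Prod.fst ((none : Option Int), (0 : Int)))
            then (Prod.snd ((none : Option Int), (0 : Int)))
            else -(Prod.snd ((none : Option Int), (0 : Int)))) = 0 := by simp
        rw [hinit] at hbound
        rw [hd1, ← hd2] at hbound
        omega
      subst hceq
      have hT : ((posOf hd.1 A).length : Int) = hd.2 := by
        rw [length_posOf, hd1]
        exact hd2.symm
      rw [if_neg (show ¬ (hd.2 ≤ PySem.Int.floordiv (A.length : Int) 2) by rw [hfd]; omega),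
        if_neg (show ¬ (2 * ((posOf hd.1 A).length : Int) ≤ (A.length : Int)) by rw [hT]; omega)]
      rw [build_inv A hd.1 A.length (le_refl _)]
      have hcm : (List.range A.length).map (fun k => if k < A.length then pcnt hd.1 A (k + 1) else 0)
          = (List.range A.length).map (fun k => pcnt hd.1 A (k + 1)) :=
        List.map_congr_left (fun k hk => if_pos (List.mem_range.mp hk))
      rw [hcm, a_count A hd.1 hlen]
      rw [PySem.List.slice_from_one, ← List.drop_one]
      have hblock := block_sum A hd.1 (posOf hd.1 A) [] 0 (by simp)
      simp only [List.length_nil, Nat.cast_zero] at hblock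
      rw [hblock]
      have hposne : posOf hd.1 A ≠ [] := by
        intro h
        rw [h] at hT
        simp at hT
        omega
      have hheadmem : (posOf hd.1 A).headD ((A.length : Int) - 1) ∈ posOf hd.1 A := by
        cases hh : posOf hd.1 A with
        | nil => exact absurd hh hposne
        | cons a b => simp
      have hhb := (mem_posOf _ _ _).mp hheadmem
      have hsplitr : PySem.List.pyRange 0 ((A.length : Int) - 1) 1
          = PySem.List.pyRange 0 ((posOf hd.1 A).headD ((A.length : Int) - 1)) 1
            ++ PySem.List.pyRange ((posOf hd.1 A).headD ((A.length : Int) - 1)) ((A.length : Int) - 1) 1 :=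
        PySem.List.pyRange_one_append _ _ _ hhb.1 (by omega)
      rw [hsplitr, List.countP_append, gap_count A hd.1 hposne]
      push_cast
      ring
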